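-- pv_equiv track=rewrite | github.com/Vaoth/aoc-2021 | day3.py | find_common_bits
-- ===== SOURCE A (Python) =====
-- from collections import defaultdict
--
-- def find_common_bits(lines, starting_bit=0, scan_all_bits=True):
--     bits = defaultdict(lambda: 0)
--     for line in lines:
--         for bit in range(starting_bit, len(line)-1):
--             bits[bit] += 1 if int(line[bit]) == 1 else -1
--             if not scan_all_bits:
--                 break
--     return bits
-- ===== SOURCE B (Python) =====
-- from collections import defaultdict
--
-- def find_common_bits(lines, starting_bit=0, scan_all_bits=True):
--     # column-major: compute each column's +1/-1 balance in one pass over the lines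
--     bits = defaultdict(lambda: 0)
--     if not lines:
--         return bits
--     if scan_all_bits:
--         columns = range(starting_bit, max(len(line) for line in lines) - 1)
--     elif any(starting_bit < len(line) - 1 for line in lines):
--         columns = [starting_bit]
--     else:
--         columns = []
--     for b in columns:
--         bits[b] = sum(1 if int(line[b]) == 1 else -1
--                       for line in lines if b < len(line) - 1)
--     return bits
-- ===== Notes on version B (the rewrite author's own statement) =====
-- stated objective: alternative
-- what changed: Row-major accumulation into a defaultdict (per line, per bit position, with a break) is replaced by a column-major computation: determine the qualifying column range once (up to max line length, or just the starting bit when scan_all_bits is false) and compute each column's +1/-1 balance with a single generator sum over the lines, writing each key once instead of one dict read-modify-write per scanned character.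
import Mathlib
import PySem

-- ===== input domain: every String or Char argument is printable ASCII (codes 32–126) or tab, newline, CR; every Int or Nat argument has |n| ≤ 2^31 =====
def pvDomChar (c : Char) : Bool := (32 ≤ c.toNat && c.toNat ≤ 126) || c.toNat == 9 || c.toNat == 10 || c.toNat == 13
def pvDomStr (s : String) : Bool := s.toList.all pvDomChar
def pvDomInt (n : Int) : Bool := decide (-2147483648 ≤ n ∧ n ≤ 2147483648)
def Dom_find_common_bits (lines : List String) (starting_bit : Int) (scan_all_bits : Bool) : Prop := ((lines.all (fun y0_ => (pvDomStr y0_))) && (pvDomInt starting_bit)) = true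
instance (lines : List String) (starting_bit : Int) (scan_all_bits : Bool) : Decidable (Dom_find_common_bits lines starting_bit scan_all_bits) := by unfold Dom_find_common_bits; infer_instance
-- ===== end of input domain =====

-- B recomputes A's per-line, row-major defaultdict accumulation column by column (alternative decomposition; return value only).

-- ===== PORT A =====
-- 1 if int(line[bit]) == 1 else -1  (the shared scoring expression of both Pythons);
-- the `-1` fallbacks are unreachable under Pre_ (IndexError / ValueError in Python)
def pvBitVal (line : String) (bit : Int) : Int :=
  match PySem.Str.pyGet? line bit with
  | some c =>
    match PySem.Int.ofChars? [c] with
    | some n => if n = 1 then 1 else -1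
    | none => -1
  | none => -1

-- the inner `for bit in range(...)` loop of A, with its break when scan_all_bits is false
def fcbInner (scan_all : Bool) (line : String) (bits : PySem.Dict Int Int) : List Int → PySem.Dict Int Int
  | [] => bits
  | b :: rest =>
    let bits' := bits.modify b 0 (· + pvBitVal line b)
    if scan_all then fcbInner scan_all line bits' rest else bits'

def find_common_bits (lines : List String) (starting_bit : Int) (scan_all_bits : Bool) : List (Int × Int) :=
  (lines.foldl
    (fun bits line =>
      fcbInner scan_all_bits line bits
        (PySem.List.pyRange starting_bit (PySem.Str.len line - 1) 1))
    PySem.Dict.empty).items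

-- ===== PORT B =====
-- the qualifying columns, in increasing order
def fcbColumns (lines : List String) (starting_bit : Int) (scan_all_bits : Bool) : List Int :=
  if scan_all_bits then
    PySem.List.pyRange starting_bit (((lines.map PySem.Str.len).max?.getD 0) - 1) 1
  else if lines.any (fun line => starting_bit < PySem.Str.len line - 1) then [starting_bit]
  else []

-- sum(1 if int(line[b]) == 1 else -1 for line in lines if b < len(line) - 1)
def fcbColSum (lines : List String) (b : Int) : Int :=
  ((lines.filter (fun line => b < PySem.Str.len line - 1)).map (fun line => pvBitVal line b)).sum

def find_common_bits_alt (lines : List String) (starting_bit : Int) (scan_all_bits : Bool) : List (Int × Int) :=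
  if lines = [] then []
  else
    ((fcbColumns lines starting_bit scan_all_bits).foldl
      (fun bits b => bits.insert b (fcbColSum lines b)) PySem.Dict.empty).items

-- ===== PRECONDITION & SPEC =====
-- Pre_: exactly where Python A returns without raising: for each line, either the line's bit
-- range is empty, or the starting bit is a valid (possibly negative) index and every position A
-- actually reads (all of the line's range when scan_all_bits, else only the starting bit) holds a
-- digit — otherwise A raises IndexError/ValueError.
def Pre_find_common_bits (lines : List String) (starting_bit : Int) (scan_all_bits : Bool) : Prop :=
  ∀ line ∈ lines,
    PySem.Str.len line - 1 ≤ starting_bit ∨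
    (-(PySem.Str.len line) ≤ starting_bit ∧
      ∀ b ∈ PySem.List.pyRange starting_bit (PySem.Str.len line - 1) 1,
        (scan_all_bits = true ∨ b = starting_bit) →
        ((PySem.Str.pyGet? line b).map PySem.Chars.isdigit).getD false = true)
instance (lines : List String) (starting_bit : Int) (scan_all_bits : Bool) : Decidable (Pre_find_common_bits lines starting_bit scan_all_bits) := by unfold Pre_find_common_bits; infer_instance

def pvWitness_find_common_bits : List String × Int × Bool := (["1011", "0011", "110"], 0, true)

def Spec_find_common_bits (lines : List String) (starting_bit : Int) (scan_all_bits : Bool) (out : List (Int × Int)) : Prop := out = find_common_bits_alt lines starting_bit scan_all_bits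
instance (lines : List String) (starting_bit : Int) (scan_all_bits : Bool) (out : List (Int × Int)) : Decidable (Spec_find_common_bits lines starting_bit scan_all_bits out) := by unfold Spec_find_common_bits; infer_instance

-- ===== CLAIM (what is proved, stated in full; the proofs are below) =====
def Claim_equal_find_common_bits : Prop := ∀ (lines : List String) (starting_bit : Int) (scan_all_bits : Bool), Dom_find_common_bits lines starting_bit scan_all_bits → Pre_find_common_bits lines starting_bit scan_all_bits → Spec_find_common_bits lines starting_bit scan_all_bits (find_common_bits lines starting_bit scan_all_bits)

-- ===== LEMMAS AND PROOFS =====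

-- the running maximum of (len line - 1) that determines A's key range
def fcbHi (lines : List String) (sb : Int) : Int :=
  lines.foldl (fun h l => max h (PySem.Str.len l - 1)) sb

-- A's row-major accumulated value at key x
def pvRowSum (lines : List String) (sb x : Int) : Int :=
  (lines.map (fun l => if x ∈ PySem.List.pyRange sb (PySem.Str.len l - 1) 1 then pvBitVal l x else 0)).sum

theorem fcbInner_true (line : String) : ∀ (r : List Int) (d : PySem.Dict Int Int),
    fcbInner true line d r = r.foldl (fun d b => d.modify b 0 (· + pvBitVal line b)) d := by
  intro r
  induction r with
  | nil => intro d; rfl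
  | cons b rest ih => intro d; simp [fcbInner, ih]

theorem getD_foldl_modify_add (v : Int → Int) : ∀ (r : List Int), r.Nodup →
    ∀ (d : PySem.Dict Int Int) (x : Int),
    (r.foldl (fun d b => d.modify b 0 (fun t => t + v b)) d).getD x 0
      = d.getD x 0 + (if x ∈ r then v x else 0) := by
  intro r
  induction r with
  | nil => intro _ d x; simp
  | cons b rest ih =>
    intro hnd d x
    rw [List.nodup_cons] at hnd
    simp only [List.foldl_cons]
    rw [ih hnd.2, PySem.Dict.getD_modify]
    by_cases hx : x = b
    · subst hx
      simp [hnd.1]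
    · simp [hx, List.mem_cons]

theorem sb_le_fcbHi : ∀ (lines : List String) (sb : Int), sb ≤ fcbHi lines sb := by
  intro lines
  induction lines with
  | nil => intro sb; simp [fcbHi]
  | cons l rest ih =>
    intro sb
    have := ih (max sb (PySem.Str.len l - 1))
    simp only [fcbHi, List.foldl_cons] at *
    exact le_trans (le_max_left _ _) this

theorem set_update_pyRange_absorb (a h c : Int) (hc : c ≤ h) :
    PySem.Set.update (PySem.List.pyRange a h 1) (PySem.List.pyRange a c 1)
      = PySem.List.pyRange a h 1 := by
  rw [PySem.Set.update_eq_append_filter,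
      PySem.Set.ofList_eq_self_of_nodup _ (PySem.List.nodup_pyRange_one a c)]
  have : (PySem.List.pyRange a c 1).filter
      (fun y => !(PySem.Set.contains (PySem.List.pyRange a h 1) y)) = [] := by
    rw [List.filter_eq_nil_iff]
    intro y hy
    rw [PySem.List.mem_pyRange_one] at hy
    simp [PySem.List.mem_pyRange_one]
    omega
  rw [this, List.append_nil]

theorem set_update_pyRange (a h c : Int) (ha : a ≤ h) :
    PySem.Set.update (PySem.List.pyRange a h 1) (PySem.List.pyRange a c 1)
      = PySem.List.pyRange a (max h c) 1 := by
  by_cases hc : c ≤ h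
  · rw [set_update_pyRange_absorb a h c hc, max_eq_left hc]
  · replace hc : h < c := by omega
    rw [PySem.List.pyRange_one_append a h c ha (hc.le), PySem.Set.update_append,
        set_update_pyRange_absorb a h h le_rfl,
        PySem.Set.update_eq_append_of_disjoint _ _ (PySem.List.nodup_pyRange_one h c)
          (by intro x hx hx'
              rw [PySem.List.mem_pyRange_one] at hx hx'
              omega),
        ← PySem.List.pyRange_one_append a h c ha hc.le, max_eq_right hc.le]

theorem afold_true_keys (sb : Int) : ∀ (lines : List String),
    ((lines.foldl (fun bits line => fcbInner true line bits
        (PySem.List.pyRange sb (PySem.Str.len line - 1) 1)) PySem.Dict.empty)).keys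
      = PySem.List.pyRange sb (fcbHi lines sb) 1 := by
  intro lines
  induction lines using List.reverseRecOn with
  | nil => simp [fcbHi, PySem.List.pyRange_one_eq_nil (le_refl sb)]
  | append_singleton rest l ih =>
    rw [List.foldl_append, List.foldl_cons, List.foldl_nil, fcbInner_true,
        PySem.Dict.keys_foldl_modify _ 0 (fun _ b => (· + pvBitVal l b)), ih,
        set_update_pyRange sb _ _ (sb_le_fcbHi rest sb)]
    simp [fcbHi]

theorem afold_true_getD (sb : Int) : ∀ (lines : List String) (x : Int),
    ((lines.foldl (fun bits line => fcbInner true line bits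
        (PySem.List.pyRange sb (PySem.Str.len line - 1) 1)) PySem.Dict.empty)).getD x 0
      = pvRowSum lines sb x := by
  intro lines
  induction lines using List.reverseRecOn with
  | nil => intro x; simp [pvRowSum]
  | append_singleton rest l ih =>
    intro x
    rw [List.foldl_append, List.foldl_cons, List.foldl_nil, fcbInner_true,
        getD_foldl_modify_add _ _ (PySem.List.nodup_pyRange_one _ _), ih]
    simp [pvRowSum]

theorem pvRowSum_cons (l : String) (rest : List String) (sb x : Int) :
    pvRowSum (l :: rest) sb x
      = (if x ∈ PySem.List.pyRange sb (PySem.Str.len l - 1) 1 then pvBitVal l x else 0)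
        + pvRowSum rest sb x := by
  simp [pvRowSum]

theorem fcbColSum_cons (l : String) (rest : List String) (x : Int) :
    fcbColSum (l :: rest) x
      = (if x < PySem.Str.len l - 1 then pvBitVal l x else 0) + fcbColSum rest x := by
  rw [fcbColSum, fcbColSum, List.filter_cons]
  by_cases h : x < PySem.Str.len l - 1
  · rw [if_pos (by simpa using h), if_pos h, List.map_cons, List.sum_cons]
  · rw [if_neg (by simpa using h), if_neg h, zero_add]

theorem pvRowSum_eq_colSum (sb x : Int) (hx : sb ≤ x) : ∀ (lines : List String),
    pvRowSum lines sb x = fcbColSum lines x := by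
  intro lines
  induction lines with
  | nil => rfl
  | cons l rest ih =>
    rw [pvRowSum_cons, fcbColSum_cons, ih]
    congr 1
    by_cases h : x < PySem.Str.len l - 1
    · rw [if_pos (by rw [PySem.List.mem_pyRange_one]; exact ⟨hx, h⟩), if_pos h]
    · rw [if_neg (by rw [PySem.List.mem_pyRange_one]; omega), if_neg h]

theorem foldl_max_sub : ∀ (xs : List Int) (x a : Int),
    (x :: xs).foldl (fun h y => max h (y - 1)) a = max a (((x :: xs).max?.getD 0) - 1) := by
  intro xs
  induction xs with
  | nil => intro x a; simp [List.max?_cons]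
  | cons y xs ih =>
    intro x a
    rw [show ((x :: y :: xs).foldl (fun h y => max h (y - 1)) a)
          = ((y :: xs).foldl (fun h y => max h (y - 1)) (max a (x - 1))) from rfl,
        ih y (max a (x - 1)), List.max?_cons (x := x) (xs := y :: xs), Option.getD_some,
        List.max?_cons (x := y) (xs := xs), Option.getD_some, Option.elim_some]
    generalize (xs.max?.elim y (max y)) = m
    omega

theorem pyRange_max_left (a u : Int) :
    PySem.List.pyRange a (max a u) 1 = PySem.List.pyRange a u 1 := by
  rcases le_total u a with h | h
  · rw [max_eq_left h, PySem.List.pyRange_one_eq_nil (le_refl a),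
        PySem.List.pyRange_one_eq_nil h]
  · rw [max_eq_right h]

theorem fcbColumns_true_eq (lines : List String) (sb : Int) (hne : lines ≠ []) :
    fcbColumns lines sb true = PySem.List.pyRange sb (fcbHi lines sb) 1 := by
  rcases lines with _ | ⟨l, rest⟩
  · exact absurd rfl hne
  · have hfold : fcbHi (l :: rest) sb
        = max sb ((((l :: rest).map PySem.Str.len).max?.getD 0) - 1) := by
      rw [fcbHi, ← List.foldl_map (f := PySem.Str.len) (g := fun h x => max h (x - 1))]
      exact foldl_max_sub _ _ _
    rw [fcbColumns, if_pos rfl, hfold, pyRange_max_left]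

theorem bfold_items (lines : List String) (cols : List Int) (hnd : cols.Nodup) :
    ((cols.foldl (fun bits b => bits.insert b (fcbColSum lines b)) PySem.Dict.empty)).items
      = cols.map (fun b => (b, fcbColSum lines b)) := by
  have := PySem.Dict.items_foldl_insert_fresh cols (fun b => b) (fun b => fcbColSum lines b)
    PySem.Dict.empty (by intro a _; exact PySem.Dict.contains_empty a) (by simpa using hnd)
  simpa using this

-- scan_all_bits = false -------------------------------------------------

theorem fcbInner_false (line : String) (d : PySem.Dict Int Int) (sb : Int) :
    fcbInner false line d (PySem.List.pyRange sb (PySem.Str.len line - 1) 1)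
      = if sb < PySem.Str.len line - 1 then d.modify sb 0 (· + pvBitVal line sb) else d := by
  by_cases h : sb < PySem.Str.len line - 1
  · rw [PySem.List.pyRange_one_cons h, if_pos h]; rfl
  · rw [PySem.List.pyRange_one_eq_nil (by omega), if_neg h]; rfl

theorem ofList_const_map {α : Type} [BEq α] [LawfulBEq α] (c : α) : ∀ (l : List String),
    PySem.Set.ofList (l.map (fun _ => c)) = if l = [] then [] else [c] := by
  intro l
  induction l with
  | nil => rfl
  | cons a l ih =>
    simp only [List.map_cons, PySem.Set.ofList_cons, ih]
    by_cases h : l = [] <;> simp [h, PySem.Set.discard]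

theorem getD_foldl_modify_const (sb : Int) : ∀ (fl : List String) (d : PySem.Dict Int Int),
    ((fl.foldl (fun d l => d.modify sb 0 (· + pvBitVal l sb)) d)).getD sb 0
      = d.getD sb 0 + (fl.map (fun l => pvBitVal l sb)).sum := by
  intro fl
  induction fl with
  | nil => intro d; simp
  | cons l fl ih =>
    intro d
    rw [List.foldl_cons, ih, PySem.Dict.getD_modify_self]
    simp
    ring

theorem afold_false_items (sb : Int) (lines : List String) :
    ((lines.foldl (fun bits line => fcbInner false line bits
        (PySem.List.pyRange sb (PySem.Str.len line - 1) 1)) PySem.Dict.empty)).items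
      = if (lines.filter (fun l => decide (sb < PySem.Str.len l - 1))) = [] then []
        else [(sb, fcbColSum lines sb)] := by
  have hstep : (lines.foldl (fun bits line => fcbInner false line bits
        (PySem.List.pyRange sb (PySem.Str.len line - 1) 1)) PySem.Dict.empty)
      = ((lines.filter (fun l => decide (sb < PySem.Str.len l - 1))).foldl
          (fun d l => d.modify sb 0 (· + pvBitVal l sb)) PySem.Dict.empty) := by
    rw [List.foldl_filter]
    apply PySem.List.foldl_congr_mem
    intro d l _
    rw [fcbInner_false]
    by_cases h : sb < PySem.Str.len l - 1
    · rw [if_pos h, if_pos (by simpa using h)]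
    · rw [if_neg h, if_neg (by simpa using h)]
  set fl := lines.filter (fun l => decide (sb < PySem.Str.len l - 1)) with hfl
  have hkeys : ((fl.foldl (fun d l => d.modify sb 0 (· + pvBitVal l sb)) PySem.Dict.empty)).keys
      = if fl = [] then [] else [sb] := by
    have hk := PySem.Dict.keys_foldl_modify_key fl (fun _ => sb) 0
      (fun _ l => (· + pvBitVal l sb)) PySem.Dict.empty
    rw [hk]
    have he : (PySem.Dict.empty : PySem.Dict Int Int).keys = [] := rfl
    rw [he, PySem.Set.update_nil_left, ofList_const_map]
  have hnd : ((fl.foldl (fun d l => d.modify sb 0 (· + pvBitVal l sb)) PySem.Dict.empty)).keys.Nodup := by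
    rw [hkeys]; split <;> simp
  rw [hstep, PySem.Dict.items_eq_map_keys _ hnd 0, hkeys]
  by_cases h : fl = []
  · simp [h]
  · rw [if_neg h, if_neg h]
    simp only [List.map_cons, List.map_nil]
    rw [getD_foldl_modify_const]
    have he : (PySem.Dict.empty : PySem.Dict Int Int).getD sb 0 = 0 := rfl
    rw [he, zero_add]
    rfl

theorem find_common_bits_main : ∀ (lines : List String) (starting_bit : Int) (scan_all_bits : Bool),
    find_common_bits lines starting_bit scan_all_bits
      = find_common_bits_alt lines starting_bit scan_all_bits := by
  intro lines sb sa
  by_cases hne : lines = []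
  · subst hne
    cases sa <;> rfl
  · cases sa
    · -- scan_all_bits = false
      have hcols : fcbColumns lines sb false
          = if lines.any (fun line => decide (sb < PySem.Str.len line - 1)) then [sb] else [] := by
        rw [fcbColumns, if_neg Bool.false_ne_true]
      by_cases h : (lines.any (fun line => decide (sb < PySem.Str.len line - 1))) = true
      · have hfl : lines.filter (fun l => decide (sb < PySem.Str.len l - 1)) ≠ [] := by
          obtain ⟨l0, hl0, hp⟩ := List.any_eq_true.1 h
          intro hnil
          rw [List.filter_eq_nil_iff] at hnil
          exact hnil l0 hl0 hp
        rw [find_common_bits, find_common_bits_alt, if_neg hne, afold_false_items, if_neg hfl,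
            bfold_items lines _ (by rw [hcols, if_pos h]; simp), hcols, if_pos h]
        rfl
      · have h' : (lines.any (fun line => decide (sb < PySem.Str.len line - 1))) = false :=
          Bool.eq_false_iff.2 h
        have hfl : lines.filter (fun l => decide (sb < PySem.Str.len l - 1)) = [] := by
          rw [List.filter_eq_nil_iff]
          exact List.any_eq_false.1 h'
        rw [find_common_bits, find_common_bits_alt, if_neg hne, afold_false_items, if_pos hfl,
            bfold_items lines _ (by rw [hcols, if_neg h]; simp), hcols, if_neg h]
        rfl
    · -- scan_all_bits = true
      rw [find_common_bits, find_common_bits_alt, if_neg hne,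
          bfold_items lines _ (by rw [fcbColumns_true_eq lines sb hne]
                                  exact PySem.List.nodup_pyRange_one _ _),
          fcbColumns_true_eq lines sb hne]
      have hnd : ((lines.foldl (fun bits line => fcbInner true line bits
          (PySem.List.pyRange sb (PySem.Str.len line - 1) 1)) PySem.Dict.empty)).keys.Nodup := by
        rw [afold_true_keys]; exact PySem.List.nodup_pyRange_one _ _
      rw [PySem.Dict.items_eq_map_keys _ hnd 0, afold_true_keys]
      apply List.map_congr_left
      intro b hb
      rw [afold_true_getD, pvRowSum_eq_colSum sb b (PySem.List.mem_pyRange_one.1 hb).1]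

-- ===== VERDICT (by name: the statement is the Claim_ definition above) =====
theorem find_common_bits_spec : Claim_equal_find_common_bits := by
  intro lines sb sa _ _
  unfold Spec_find_common_bits
  exact find_common_bits_main lines sb sa
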